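-- pv_equiv track=rewrite | github.com/tompko/aoc | day14.py | simulate1
-- ===== SOURCE A (Python) =====
-- def run(p, limit):
--     dist = 0
--     name, speed, time, rest = p
--     while limit > 0:
--         t = min(time, limit)
--         dist += speed * t
--         limit -= t
--         limit -= rest
--     return dist
--
-- def simulate1(reindeers, limit):
--     max_dist = 0
--     winner = None
--     for r in reindeers:
--         d = run(r, limit)
--         if d > max_dist:
--             max_dist = d
--             winner = r[0]
--     return winner, max_dist
-- ===== SOURCE B (Python) =====
-- def simulate1(reindeers, limit):
--     winner, max_dist = None, 0
--     if limit > 0: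
--         for name, speed, time, rest in reindeers:
--             q, rem = divmod(limit, time + rest)
--             d = speed * (q * time + min(time, rem))
--             if d > max_dist:
--                 winner, max_dist = name, d
--     return winner, max_dist
-- ===== Notes on version B (the rewrite author's own statement) =====
-- stated objective: alternative
-- what changed: B replaces A's per-cycle while-loop simulation of each reindeer with the closed-form divmod formula full_cycles*time + min(time, remainder) per reindeer, keeping a single scan for the maximum.
-- outside the precondition, e.g. on simulate1([('a', -1, -1, 2)], 1): A returns ('a', 1), B returns ('a', 2)
import Mathlib
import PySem

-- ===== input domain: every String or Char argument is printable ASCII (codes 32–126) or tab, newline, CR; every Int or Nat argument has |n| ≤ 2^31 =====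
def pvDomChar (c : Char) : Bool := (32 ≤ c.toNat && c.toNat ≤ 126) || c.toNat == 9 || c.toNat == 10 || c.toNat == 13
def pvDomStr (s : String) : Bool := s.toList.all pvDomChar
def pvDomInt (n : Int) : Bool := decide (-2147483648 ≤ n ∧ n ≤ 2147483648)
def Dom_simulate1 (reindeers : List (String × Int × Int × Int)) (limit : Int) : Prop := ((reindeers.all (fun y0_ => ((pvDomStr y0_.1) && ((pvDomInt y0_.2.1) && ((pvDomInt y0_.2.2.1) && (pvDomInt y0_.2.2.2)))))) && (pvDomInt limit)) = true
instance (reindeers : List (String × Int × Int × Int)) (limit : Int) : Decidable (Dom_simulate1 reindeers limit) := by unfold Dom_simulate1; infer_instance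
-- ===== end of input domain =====

-- B replaces A's per-cycle while-loop simulation with the closed-form divmod formula per reindeer (alternative algorithm).

-- ===== PORT A =====
-- A's `run` while-loop; fuel = limit.toNat + 1 suffices because under Pre_ the loop
-- decreases `limit` by at least 1 each iteration (a totality guard only, not an algorithm switch).
def runLoop (speed time rest : Int) : Nat → Int → Int → Int
  | 0, _, dist => dist
  | fuel + 1, limit, dist =>
    if limit > 0 then
      runLoop speed time rest fuel (limit - min time limit - rest) (dist + speed * min time limit)
    else dist

def runA (p : String × Int × Int × Int) (limit : Int) : Int :=
  runLoop p.2.1 p.2.2.1 p.2.2.2 (limit.toNat + 1) limit 0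

def simulate1 (reindeers : List (String × Int × Int × Int)) (limit : Int) : Option String × Int :=
  reindeers.foldl
    (fun st r =>
      let d := runA r limit
      if d > st.2 then (some r.1, d) else st)
    (none, 0)

-- ===== PORT B =====
def simulate1_alt (reindeers : List (String × Int × Int × Int)) (limit : Int) : Option String × Int :=
  if limit > 0 then
    reindeers.foldl
      (fun st r =>
        let q := PySem.Int.floordiv limit (r.2.2.1 + r.2.2.2)
        let rem := PySem.Int.mod limit (r.2.2.1 + r.2.2.2)
        let d := r.2.1 * (q * r.2.2.1 + min r.2.2.1 rem)
        if d > st.2 then (some r.1, d) else st)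
      (none, 0)
  else (none, 0)

-- ===== PRECONDITION & SPEC =====
-- Pre_ excludes inputs with limit > 0 where some reindeer has time < 1 or rest < 0: outside the
-- function's natural domain A's loop diverges or simulates nonsense negative flight (it may still
-- return a value there), and B divides by time + rest.
def Pre_simulate1 (reindeers : List (String × Int × Int × Int)) (limit : Int) : Prop :=
  limit ≤ 0 ∨ ∀ r ∈ reindeers, 1 ≤ r.2.2.1 ∧ 0 ≤ r.2.2.2
instance (reindeers : List (String × Int × Int × Int)) (limit : Int) : Decidable (Pre_simulate1 reindeers limit) := by unfold Pre_simulate1; infer_instance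

def pvWitness_simulate1 : (List (String × Int × Int × Int)) × Int :=
  ([("Comet", 14, 10, 127), ("Dancer", 16, 11, 162)], 1000)

def Spec_simulate1 (reindeers : List (String × Int × Int × Int)) (limit : Int) (out : Option String × Int) : Prop := out = simulate1_alt reindeers limit
instance (reindeers : List (String × Int × Int × Int)) (limit : Int) (out : Option String × Int) : Decidable (Spec_simulate1 reindeers limit out) := by unfold Spec_simulate1; infer_instance

-- ===== CLAIM (what is proved, stated in full; the proofs are below) =====
def Claim_equal_simulate1 : Prop := ∀ (reindeers : List (String × Int × Int × Int)) (limit : Int), Dom_simulate1 reindeers limit → Pre_simulate1 reindeers limit → Spec_simulate1 reindeers limit (simulate1 reindeers limit)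

-- ===== LEMMAS AND PROOFS =====

-- closed-form flight time of one reindeer (proof-side characterisation of A's loop)
def flight (time rest limit : Int) : Int :=
  if limit ≤ 0 then 0
  else PySem.Int.floordiv limit (time + rest) * time + min time (PySem.Int.mod limit (time + rest))

theorem flight_step (time rest limit : Int) (ht : 1 ≤ time) (hr : 0 ≤ rest) (hl : 0 < limit) :
    flight time rest limit = min time limit + flight time rest (limit - min time limit - rest) := by
  have hc : (0:Int) < time + rest := by omega
  unfold flight
  rw [PySem.Int.floordiv_eq_ediv_of_pos hc, PySem.Int.mod_eq_emod_of_pos hc]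
  by_cases hml : limit ≤ time
  · -- t = limit; new limit = -rest ≤ 0
    have hmin : min time limit = limit := by omega
    rw [hmin, if_neg (by omega), if_pos (by omega)]
    by_cases hcl : limit < time + rest
    · rw [Int.ediv_eq_zero_of_lt (by omega) hcl, Int.emod_eq_of_lt (by omega) hcl]
      omega
    · have hle : limit = time + rest := by omega
      rw [hle, Int.ediv_self (by omega), Int.emod_self]
      omega
  · -- t = time
    have hmin : min time limit = time := by omega
    rw [hmin, if_neg (by omega)]
    by_cases hgt : time + rest < limit
    · -- one more full cycle
      rw [if_neg (by omega)]
      have hdiv : (limit - time - rest) / (time + rest) = limit / (time + rest) - 1 := by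
        have := Int.add_mul_ediv_right (limit - time - rest) 1 (by omega : time + rest ≠ 0)
        have harg : limit - time - rest + 1 * (time + rest) = limit := by ring
        rw [harg] at this
        omega
      have hmod : (limit - time - rest) % (time + rest) = limit % (time + rest) := by
        have := Int.add_mul_emod_self_left (a := limit - time - rest) (b := time + rest) (c := 1)
        have harg : limit - time - rest + (time + rest) * 1 = limit := by ring
        rw [harg] at this
        omega
      rw [PySem.Int.floordiv_eq_ediv_of_pos hc, PySem.Int.mod_eq_emod_of_pos hc, hdiv, hmod]
      ring
    · -- last (possibly partial) cycle: new limit ≤ 0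
      rw [if_pos (by omega)]
      by_cases hcl : limit < time + rest
      · rw [Int.ediv_eq_zero_of_lt (by omega) hcl, Int.emod_eq_of_lt (by omega) hcl]
        omega
      · have hle : limit = time + rest := by omega
        rw [hle, Int.ediv_self (by omega), Int.emod_self]
        omega

theorem runLoop_eq (speed time rest : Int) (ht : 1 ≤ time) (hr : 0 ≤ rest) :
    ∀ (fuel : Nat) (limit dist : Int), limit ≤ (fuel : Int) →
      runLoop speed time rest fuel limit dist = dist + speed * flight time rest limit := by
  intro fuel
  induction fuel with
  | zero =>
    intro limit dist hf
    simp only [runLoop, flight]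
    rw [if_pos (by exact_mod_cast hf)]
    ring
  | succ n ih =>
    intro limit dist hf
    simp only [runLoop]
    by_cases hl : limit > 0
    · rw [if_pos hl, ih _ _ (by omega), flight_step time rest limit ht hr hl]
      ring
    · rw [if_neg hl]
      unfold flight
      rw [if_pos (by omega)]
      ring

theorem runA_eq (r : String × Int × Int × Int) (limit : Int)
    (ht : 1 ≤ r.2.2.1) (hr : 0 ≤ r.2.2.2) :
    runA r limit = r.2.1 * flight r.2.2.1 r.2.2.2 limit := by
  unfold runA
  rw [runLoop_eq r.2.1 r.2.2.1 r.2.2.2 ht hr (limit.toNat + 1) limit 0 (by omega)]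
  ring

theorem foldl_nonpos (limit : Int) (hl : limit ≤ 0) :
    ∀ (l : List (String × Int × Int × Int)),
      l.foldl (fun st r => let d := runA r limit; if d > st.2 then (some r.1, d) else st)
        ((none : Option String), (0 : Int)) = (none, 0) := by
  intro l
  induction l with
  | nil => rfl
  | cons x xs ih =>
    simp only [List.foldl_cons]
    have hrun : runA x limit = 0 := by
      unfold runA
      simp only [runLoop]
      rw [if_neg (by omega)]
    simp only [hrun]
    rw [if_neg (by simp)]
    exact ih

-- ===== VERDICT (by name: the statement is the Claim_ definition above) =====
theorem simulate1_spec : Claim_equal_simulate1 := by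
  intro reindeers limit _hdom hpre
  unfold Spec_simulate1 simulate1 simulate1_alt
  by_cases hl : limit > 0
  · rw [if_pos hl]
    have hall : ∀ r ∈ reindeers, 1 ≤ r.2.2.1 ∧ 0 ≤ r.2.2.2 := by
      rcases hpre with h | h
      · omega
      · exact h
    apply PySem.List.foldl_congr_mem
    intro st r hmem
    have ht := (hall r hmem).1
    have hr := (hall r hmem).2
    have hc : (0:Int) < r.2.2.1 + r.2.2.2 := by omega
    simp only [runA_eq r limit ht hr, flight, if_neg (by omega : ¬ limit ≤ 0)]
  · rw [if_neg hl]
    exact foldl_nonpos limit (by omega) reindeers
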